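-- pv_equiv track=rewrite | github.com/Edd13Mora/botstrike | modules/recon.py | classify_flows
-- ===== SOURCE A (Python) =====
-- FLOW_PATTERNS: dict[str, list[str]] = {
--     "login":          ["/login", "/signin", "/sign-in", "/auth/login", "/account/login", "/user/login", "/session/new"],
--     "signup":         ["/signup", "/register", "/sign-up", "/create-account", "/join", "/account/create", "/enroll"],
--     "password_reset": ["/forgot", "/reset", "/password-reset", "/recover", "/account/recover", "/lost-password"],
--     "checkout":       ["/checkout", "/cart", "/basket", "/bag", "/order/new", "/purchase"],
--     "sales":          ["/pricing", "/plans", "/buy", "/quote", "/request-demo", "/contact-sales"],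
--     "api":            ["/api/", "/v1/", "/v2/", "/v3/", "/graphql", "/rest/", "/rpc/"],
-- }
--
-- def classify_flows(urls: list[str]) -> dict[str, list[str]]:
--     flows: dict[str, list[str]] = {k: [] for k in FLOW_PATTERNS}
--     for url in urls:
--         path = url.lower()
--         for flow_name, patterns in FLOW_PATTERNS.items():
--             if any(p in path for p in patterns):
--                 flows[flow_name].append(url)
--                 break
--     return {k: v for k, v in flows.items() if v}
-- ===== SOURCE B (Python) =====
-- FLOW_PATTERNS: dict[str, list[str]] = {
--     "login":          ["/login", "/signin", "/sign-in", "/auth/login", "/account/login", "/user/login", "/session/new"],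
--     "signup":         ["/signup", "/register", "/sign-up", "/create-account", "/join", "/account/create", "/enroll"],
--     "password_reset": ["/forgot", "/reset", "/password-reset", "/recover", "/account/recover", "/lost-password"],
--     "checkout":       ["/checkout", "/cart", "/basket", "/bag", "/order/new", "/purchase"],
--     "sales":          ["/pricing", "/plans", "/buy", "/quote", "/request-demo", "/contact-sales"],
--     "api":            ["/api/", "/v1/", "/v2/", "/v3/", "/graphql", "/rest/", "/rpc/"],
-- }
--
-- def classify_flows(urls: list[str]) -> dict[str, list[str]]:
--     # Transposed loops: categories outer, URLs inner; earlier categories claim URL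
--     # indices first, which reproduces A's first-match-wins break.
--     result: dict[str, list[str]] = {}
--     claimed: set[int] = set()
--     for flow_name, patterns in FLOW_PATTERNS.items():
--         bucket: list[str] = []
--         for idx, url in enumerate(urls):
--             if idx in claimed:
--                 continue
--             path = url.lower()
--             if any(p in path for p in patterns):
--                 bucket.append(url)
--                 claimed.add(idx)
--         result[flow_name] = bucket
--     return {k: v for k, v in result.items() if v}
-- ===== Notes on version B (the rewrite author's own statement) =====
-- stated objective: alternative
-- what changed: Transposed the two loops: instead of scanning the category dict per URL with an inner break, B iterates categories in order and scans the URL list once per category, using a claimed-index set to preserve first-match-wins; the result dict is built per category instead of mutated per URL.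
import Mathlib
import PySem

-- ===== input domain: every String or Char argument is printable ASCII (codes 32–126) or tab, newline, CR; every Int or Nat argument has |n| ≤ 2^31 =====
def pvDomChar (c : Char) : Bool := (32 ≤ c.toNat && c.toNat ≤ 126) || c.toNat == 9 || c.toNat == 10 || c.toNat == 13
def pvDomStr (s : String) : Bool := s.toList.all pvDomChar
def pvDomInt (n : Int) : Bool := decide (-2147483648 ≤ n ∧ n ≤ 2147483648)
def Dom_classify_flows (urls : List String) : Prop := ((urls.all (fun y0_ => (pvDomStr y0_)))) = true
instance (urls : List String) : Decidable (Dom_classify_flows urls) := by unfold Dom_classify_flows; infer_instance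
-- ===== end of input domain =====

-- B transposes A's two loops (categories outer, URLs inner, with a claimed-index set);
-- objective: alternative decomposition, same exact result.

-- ===== PORT A =====
def FLOW_PATTERNS : PySem.Dict String (List String) := PySem.Dict.ofList [
  ("login", ["/login", "/signin", "/sign-in", "/auth/login", "/account/login", "/user/login", "/session/new"]),
  ("signup", ["/signup", "/register", "/sign-up", "/create-account", "/join", "/account/create", "/enroll"]),
  ("password_reset", ["/forgot", "/reset", "/password-reset", "/recover", "/account/recover", "/lost-password"]),
  ("checkout", ["/checkout", "/cart", "/basket", "/bag", "/order/new", "/purchase"]),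
  ("sales", ["/pricing", "/plans", "/buy", "/quote", "/request-demo", "/contact-sales"]),
  ("api", ["/api/", "/v1/", "/v2/", "/v3/", "/graphql", "/rest/", "/rpc/"])]

-- inner 'for flow_name, patterns in FLOW_PATTERNS.items(): if any(...): append; break'
def classifyInnerA (flows : PySem.Dict String (List String)) (url path : String) :
    List (String × List String) → PySem.Dict String (List String)
  | [] => flows
  | (flow_name, patterns) :: rest =>
    if patterns.any (fun p => PySem.Str.isIn p path) then
      PySem.Dict.modify flows flow_name [] (fun v => v ++ [url])
    else classifyInnerA flows url path rest

def classify_flows (urls : List String) : List (String × List String) :=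
  let flows0 : PySem.Dict String (List String) :=
    (PySem.Dict.keys FLOW_PATTERNS).foldl (fun d k => d.insert k []) PySem.Dict.empty
  let flows := urls.foldl (fun flows url =>
    classifyInnerA flows url (PySem.Str.lower url) (PySem.Dict.items FLOW_PATTERNS)) flows0
  (PySem.Dict.items flows).filter (fun kv => !kv.2.isEmpty)

-- ===== PORT B =====
-- inner 'for idx, url in enumerate(urls): …' body (state = (bucket, claimed))
def bStep (patterns : List String) (st : List String × PySem.Set Int) (p : Int × String) :
    List String × PySem.Set Int :=
  if PySem.Set.contains st.2 p.1 then st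
  else
    let path := PySem.Str.lower p.2
    if patterns.any (fun q => PySem.Str.isIn q path) then
      (st.1 ++ [p.2], PySem.Set.add st.2 p.1)
    else st

def classify_flows_alt (urls : List String) : List (String × List String) :=
  let res := (PySem.Dict.items FLOW_PATTERNS).foldl
    (fun (st : PySem.Dict String (List String) × PySem.Set Int) kv =>
      let r := (PySem.List.enumerate urls 0).foldl (bStep kv.2) ([], st.2)
      (st.1.insert kv.1 r.1, r.2))
    (PySem.Dict.empty, PySem.Set.empty)
  (PySem.Dict.items res.1).filter (fun kv => !kv.2.isEmpty)

-- ===== PRECONDITION & SPEC =====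
def Spec_classify_flows (urls : List String) (out : List (String × List String)) : Prop := out = classify_flows_alt urls
instance (urls : List String) (out : List (String × List String)) : Decidable (Spec_classify_flows urls out) := by unfold Spec_classify_flows; infer_instance

-- ===== CLAIM (what is proved, stated in full; the proofs are below) =====
def Claim_equal_classify_flows : Prop := ∀ (urls : List String), Dom_classify_flows urls → Spec_classify_flows urls (classify_flows urls)

-- ===== LEMMAS AND PROOFS =====

def P1 : List String := ["/login", "/signin", "/sign-in", "/auth/login", "/account/login", "/user/login", "/session/new"]
def P2 : List String := ["/signup", "/register", "/sign-up", "/create-account", "/join", "/account/create", "/enroll"]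
def P3 : List String := ["/forgot", "/reset", "/password-reset", "/recover", "/account/recover", "/lost-password"]
def P4 : List String := ["/checkout", "/cart", "/basket", "/bag", "/order/new", "/purchase"]
def P5 : List String := ["/pricing", "/plans", "/buy", "/quote", "/request-demo", "/contact-sales"]
def P6 : List String := ["/api/", "/v1/", "/v2/", "/v3/", "/graphql", "/rest/", "/rpc/"]
def mtch (pats : List String) (u : String) : Bool := pats.any (fun p => PySem.Str.isIn p (PySem.Str.lower u))
def c1 (u : String) : Bool := mtch P1 u
def c2 (u : String) : Bool := c1 u || mtch P2 u
def c3 (u : String) : Bool := c2 u || mtch P3 u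
def c4 (u : String) : Bool := c3 u || mtch P4 u
def c5 (u : String) : Bool := c4 u || mtch P5 u
def g1 (u : String) : Bool := mtch P1 u
def g2 (u : String) : Bool := !c1 u && mtch P2 u
def g3 (u : String) : Bool := !c2 u && mtch P3 u
def g4 (u : String) : Bool := !c3 u && mtch P4 u
def g5 (u : String) : Bool := !c4 u && mtch P5 u
def g6 (u : String) : Bool := !c5 u && mtch P6 u
theorem ITEMS_eq : PySem.Dict.items FLOW_PATTERNS =
    [("login", P1), ("signup", P2), ("password_reset", P3), ("checkout", P4), ("sales", P5), ("api", P6)] := by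
  decide


def DL (a b c d e f : List String) : PySem.Dict String (List String) :=
  PySem.Dict.mk [("login", a), ("signup", b), ("password_reset", c), ("checkout", d), ("sales", e), ("api", f)]


theorem stepA (u : String) (a b c d e f : List String) :
    classifyInnerA (DL a b c d e f) u (PySem.Str.lower u)
      [("login", P1), ("signup", P2), ("password_reset", P3), ("checkout", P4), ("sales", P5), ("api", P6)]
    = DL (a ++ if g1 u then [u] else []) (b ++ if g2 u then [u] else [])
         (c ++ if g3 u then [u] else []) (d ++ if g4 u then [u] else [])
         (e ++ if g5 u then [u] else []) (f ++ if g6 u then [u] else []) := by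
  have e1 := Bool.eq_false_or_eq_true (mtch P1 u)
  have e2 := Bool.eq_false_or_eq_true (mtch P2 u)
  have e3 := Bool.eq_false_or_eq_true (mtch P3 u)
  have e4 := Bool.eq_false_or_eq_true (mtch P4 u)
  have e5 := Bool.eq_false_or_eq_true (mtch P5 u)
  have e6 := Bool.eq_false_or_eq_true (mtch P6 u)
  have m1 : (P1.any fun p => PySem.Str.isIn p (PySem.Str.lower u)) = mtch P1 u := rfl
  have m2 : (P2.any fun p => PySem.Str.isIn p (PySem.Str.lower u)) = mtch P2 u := rfl
  have m3 : (P3.any fun p => PySem.Str.isIn p (PySem.Str.lower u)) = mtch P3 u := rfl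
  have m4 : (P4.any fun p => PySem.Str.isIn p (PySem.Str.lower u)) = mtch P4 u := rfl
  have m5 : (P5.any fun p => PySem.Str.isIn p (PySem.Str.lower u)) = mtch P5 u := rfl
  have m6 : (P6.any fun p => PySem.Str.isIn p (PySem.Str.lower u)) = mtch P6 u := rfl
  simp only [classifyInnerA, m1, m2, m3, m4, m5, m6]
  rcases e1 with h1 | h1 <;> rw [h1]
  · simp [DL, PySem.Dict.modify, PySem.Dict.contains, PySem.Dict.getD, PySem.Dict.get?,
        PySem.Dict.insert, g1, g2, g3, g4, g5, g6, c1, c2, c3, c4, c5, h1]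
  · rcases e2 with h2 | h2 <;> rw [h2]
    · simp [DL, PySem.Dict.modify, PySem.Dict.contains, PySem.Dict.getD, PySem.Dict.get?,
          PySem.Dict.insert, g1, g2, g3, g4, g5, g6, c1, c2, c3, c4, c5, h1, h2]
    · rcases e3 with h3 | h3 <;> rw [h3]
      · simp [DL, PySem.Dict.modify, PySem.Dict.contains, PySem.Dict.getD, PySem.Dict.get?,
            PySem.Dict.insert, g1, g2, g3, g4, g5, g6, c1, c2, c3, c4, c5, h1, h2, h3]
      · rcases e4 with h4 | h4 <;> rw [h4]
        · simp [DL, PySem.Dict.modify, PySem.Dict.contains, PySem.Dict.getD, PySem.Dict.get?,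
              PySem.Dict.insert, g1, g2, g3, g4, g5, g6, c1, c2, c3, c4, c5, h1, h2, h3, h4]
        · rcases e5 with h5 | h5 <;> rw [h5]
          · simp [DL, PySem.Dict.modify, PySem.Dict.contains, PySem.Dict.getD, PySem.Dict.get?,
                PySem.Dict.insert, g1, g2, g3, g4, g5, g6, c1, c2, c3, c4, c5, h1, h2, h3, h4, h5]
          · rcases e6 with h6 | h6 <;> rw [h6]
            · simp [DL, PySem.Dict.modify, PySem.Dict.contains, PySem.Dict.getD, PySem.Dict.get?,
                  PySem.Dict.insert, g1, g2, g3, g4, g5, g6, c1, c2, c3, c4, c5, h1, h2, h3, h4, h5, h6]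
            · simp [DL, PySem.Dict.modify, PySem.Dict.contains, PySem.Dict.getD, PySem.Dict.get?,
                  PySem.Dict.insert, g1, g2, g3, g4, g5, g6, c1, c2, c3, c4, c5, h1, h2, h3, h4, h5, h6]

theorem append_ite_filter (a : List String) (g : String -> Bool) (u : String) (t : List String) :
    a ++ ((if g u then [u] else []) ++ t.filter g) = a ++ (u :: t).filter g := by
  rw [List.filter_cons]
  by_cases h : g u = true
  · rw [h]; simp
  · simp only [Bool.not_eq_true] at h; rw [h]; simp


theorem loopA (urls : List String) : ∀ a b c d e f : List String,
    urls.foldl (fun flows url =>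
        classifyInnerA flows url (PySem.Str.lower url) (PySem.Dict.items FLOW_PATTERNS))
      (DL a b c d e f)
    = DL (a ++ urls.filter g1) (b ++ urls.filter g2) (c ++ urls.filter g3)
         (d ++ urls.filter g4) (e ++ urls.filter g5) (f ++ urls.filter g6) := by
  induction urls with
  | nil => intro a b c d e f; simp
  | cons u t ih =>
    intro a b c d e f
    rw [List.foldl_cons]
    have : classifyInnerA (DL a b c d e f) u (PySem.Str.lower u) (PySem.Dict.items FLOW_PATTERNS)
        = DL (a ++ if g1 u then [u] else []) (b ++ if g2 u then [u] else [])
             (c ++ if g3 u then [u] else []) (d ++ if g4 u then [u] else [])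
             (e ++ if g5 u then [u] else []) (f ++ if g6 u then [u] else []) := by
      rw [ITEMS_eq, stepA]
    rw [this, ih]
    simp only [List.append_assoc, append_ite_filter]

theorem beq_decide_int (x j : Int) : (x == j) = decide (x = j) := by
  by_cases h : x = j
  · subst h; simp
  · simp [beq_iff_eq, h]
theorem contains_add (s : PySem.Set Int) (j x : Int) :
    PySem.Set.contains (PySem.Set.add s j) x = (PySem.Set.contains s x || x == j) := by
  simp only [PySem.Set.add, PySem.Set.contains]
  by_cases hj : List.contains s j = true
  · rw [if_pos hj]
    by_cases hx : (x == j) = true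
    · have hxe : x = j := by simpa [beq_iff_eq] using hx
      subst hxe
      rw [hj, hx]; simp
    · simp only [Bool.not_eq_true] at hx
      rw [hx]; simp
  · simp only [Bool.not_eq_true] at hj
    rw [if_neg (by rw [hj]; simp)]
    rw [List.contains_append]
    simp [beq_decide_int]

theorem beq_comm_int (j k : Int) : (j == k) = (k == j) := by
  by_cases h : j = k
  · subst h; simp
  · simp [beq_iff_eq, h, Ne.symm h]

theorem bLoop (pats : List String) (c : String → Bool) :
    ∀ (L : List (Int × String)) (bucket : List String) (claimed : PySem.Set Int),
    L.Pairwise (fun p q => p.1 ≠ q.1) →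
    (∀ p ∈ L, PySem.Set.contains claimed p.1 = c p.2) →
    (L.foldl (bStep pats) (bucket, claimed)).1
        = bucket ++ (L.filter (fun p => !c p.2 && mtch pats p.2)).map Prod.snd
    ∧ ∀ j : Int, PySem.Set.contains (L.foldl (bStep pats) (bucket, claimed)).2 j
        = (PySem.Set.contains claimed j || L.any (fun p => p.1 == j && (!c p.2 && mtch pats p.2))) := by
  intro L
  induction L with
  | nil => intro bucket claimed _ _; simp
  | cons p rest ih =>
    intro bucket claimed hpw hinv
    rcases List.pairwise_cons.mp hpw with ⟨hp1, hrest⟩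
    have hhead : PySem.Set.contains claimed p.1 = c p.2 := hinv p (List.mem_cons_self)
    have hinv' : ∀ q ∈ rest, PySem.Set.contains claimed q.1 = c q.2 :=
      fun q hq => hinv q (List.mem_cons_of_mem _ hq)
    rw [List.foldl_cons]
    by_cases hc : c p.2 = true
    · have hstep : bStep pats (bucket, claimed) p = (bucket, claimed) := by
        rw [bStep]
        rw [hhead, hc]
        simp
      rw [hstep]
      obtain ⟨h1, h2⟩ := ih bucket claimed hrest hinv'
      refine ⟨?_, ?_⟩
      · rw [h1, List.filter_cons]
        rw [hc]; simp
      · intro j; rw [h2 j, List.any_cons]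
        rw [hc]; simp
    · simp only [Bool.not_eq_true] at hc
      have hm0 := Bool.eq_false_or_eq_true (mtch pats p.2)
      by_cases hm : mtch pats p.2 = true
      · have hmr : (pats.any fun q => PySem.Str.isIn q (PySem.Str.lower p.2)) = true := hm
        have hstep : bStep pats (bucket, claimed) p = (bucket ++ [p.2], PySem.Set.add claimed p.1) := by
          rw [bStep, hhead, hc]
          simp only [Bool.false_eq_true, if_false]
          rw [hmr]
          simp
        rw [hstep]
        have hinv2 : ∀ q ∈ rest, PySem.Set.contains (PySem.Set.add claimed p.1) q.1 = c q.2 := by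
          intro q hq
          rw [contains_add]
          have hne : (q.1 == p.1) = false := by simpa [beq_iff_eq] using (hp1 q hq).symm
          rw [hne, hinv' q hq]; simp
        obtain ⟨h1, h2⟩ := ih (bucket ++ [p.2]) (PySem.Set.add claimed p.1) hrest hinv2
        refine ⟨?_, ?_⟩
        · rw [h1, List.filter_cons]
          rw [hc, hm]; simp
        · intro j
          rw [h2 j, contains_add, List.any_cons]
          rw [hc, hm, beq_comm_int j p.1]
          simp [Bool.or_assoc]
      · simp only [Bool.not_eq_true] at hm
        have hmr : (pats.any fun q => PySem.Str.isIn q (PySem.Str.lower p.2)) = false := hm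
        have hstep : bStep pats (bucket, claimed) p = (bucket, claimed) := by
          rw [bStep, hhead, hc]
          simp only [Bool.false_eq_true, if_false]
          rw [hmr]
          simp
        rw [hstep]
        obtain ⟨h1, h2⟩ := ih bucket claimed hrest hinv'
        refine ⟨?_, ?_⟩
        · rw [h1, List.filter_cons]
          rw [hm]; simp
        · intro j; rw [h2 j, List.any_cons]
          rw [hm]; simp

theorem any_fst_pick (f : (Int × String) → Bool) :
    ∀ (L : List (Int × String)), L.Pairwise (fun p q => p.1 ≠ q.1) →
    ∀ p ∈ L, L.any (fun q => q.1 == p.1 && f q) = f p := by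
  intro L
  induction L with
  | nil => intro _ p hp; simp at hp
  | cons q rest ih =>
    intro hpw p hp
    rcases List.pairwise_cons.mp hpw with ⟨hq, hrest⟩
    rcases List.mem_cons.mp hp with rfl | hp'
    · have hz : rest.any (fun r => r.1 == p.1 && f r) = false := by
        rw [List.any_eq_false]
        intro r hr
        have := hq r hr
        simp only [Bool.and_eq_true, beq_iff_eq, not_and]
        intro h; exact absurd h.symm this
      rw [List.any_cons, hz]
      simp
    · have h1 : (q.1 == p.1) = false := by
        simpa [beq_iff_eq] using hq p hp'
      rw [List.any_cons, ih hrest p hp', h1]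
      simp

theorem enum_filter_map (h : String → Bool) : ∀ (urls : List String) (s : Int),
    ((PySem.List.enumerate urls s).filter (fun p => h p.2)).map Prod.snd = urls.filter h := by
  intro urls
  induction urls with
  | nil => intro s; simp [PySem.List.enumerate_nil]
  | cons u t ih =>
    intro s
    rw [PySem.List.enumerate_cons]
    by_cases hu : h u = true
    · simp [hu, ih]
    · simp only [Bool.not_eq_true] at hu
      simp [hu, ih]

theorem A_char (urls : List String) : classify_flows urls =
    [("login", urls.filter g1), ("signup", urls.filter g2), ("password_reset", urls.filter g3),
     ("checkout", urls.filter g4), ("sales", urls.filter g5),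
     ("api", urls.filter g6)].filter (fun kv => !kv.2.isEmpty) := by
  have h0 : (PySem.Dict.keys FLOW_PATTERNS).foldl
      (fun d k => d.insert k ([] : List String)) PySem.Dict.empty = DL [] [] [] [] [] [] := by decide
  simp only [classify_flows]
  rw [h0, loopA]
  simp [DL, PySem.Dict.items]

theorem stageB (pats : List String) (cprev : String → Bool) (claimed : PySem.Set Int) (urls : List String)
    (hinv : ∀ p ∈ PySem.List.enumerate urls 0, PySem.Set.contains claimed p.1 = cprev p.2) :
    ((PySem.List.enumerate urls 0).foldl (bStep pats) ([], claimed)).1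
        = urls.filter (fun u => !cprev u && mtch pats u)
    ∧ ∀ p ∈ PySem.List.enumerate urls 0,
        PySem.Set.contains ((PySem.List.enumerate urls 0).foldl (bStep pats) ([], claimed)).2 p.1
          = (cprev p.2 || mtch pats p.2) := by
  have hpw : (PySem.List.enumerate urls 0).Pairwise (fun p q => p.1 ≠ q.1) :=
    (PySem.List.pairwise_lt_enumerate urls 0).imp (fun h => ne_of_lt h)
  obtain ⟨h1, h2⟩ := bLoop pats cprev (PySem.List.enumerate urls 0) [] claimed hpw hinv
  constructor
  · rw [h1, enum_filter_map (fun u => !cprev u && mtch pats u) urls 0]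
    simp
  · intro p hp
    rw [h2 p.1]
    rw [any_fst_pick (fun q => !cprev q.2 && mtch pats q.2) (PySem.List.enumerate urls 0) hpw p hp]
    rw [hinv p hp]
    cases hcp : cprev p.2 <;> simp


def stage (pats : List String) (claimed : PySem.Set Int) (urls : List String) :
    List String × PySem.Set Int :=
  (PySem.List.enumerate urls 0).foldl (bStep pats) ([], claimed)
def R1 (urls : List String) : List String × PySem.Set Int := stage P1 PySem.Set.empty urls
def R2 (urls : List String) : List String × PySem.Set Int := stage P2 (R1 urls).2 urls
def R3 (urls : List String) : List String × PySem.Set Int := stage P3 (R2 urls).2 urls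
def R4 (urls : List String) : List String × PySem.Set Int := stage P4 (R3 urls).2 urls
def R5 (urls : List String) : List String × PySem.Set Int := stage P5 (R4 urls).2 urls
def R6 (urls : List String) : List String × PySem.Set Int := stage P6 (R5 urls).2 urls

theorem B_unfold (urls : List String) : classify_flows_alt urls =
    (PySem.Dict.items ((((((PySem.Dict.empty.insert "login" (R1 urls).1).insert "signup"
      (R2 urls).1).insert "password_reset" (R3 urls).1).insert "checkout" (R4 urls).1).insert
      "sales" (R5 urls).1).insert "api" (R6 urls).1)).filter (fun kv => !kv.2.isEmpty) := by
  simp only [classify_flows_alt, ITEMS_eq, List.foldl_cons, List.foldl_nil]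
  rfl

theorem B_char (urls : List String) : classify_flows_alt urls =
    [("login", urls.filter g1), ("signup", urls.filter g2), ("password_reset", urls.filter g3),
     ("checkout", urls.filter g4), ("sales", urls.filter g5),
     ("api", urls.filter g6)].filter (fun kv => !kv.2.isEmpty) := by
  have h0 : ∀ p ∈ PySem.List.enumerate urls 0,
      PySem.Set.contains PySem.Set.empty p.1 = (fun _ : String => false) p.2 := by
    intro p _; rfl
  obtain ⟨v1, k1⟩ := stageB P1 (fun _ => false) PySem.Set.empty urls h0
  have k1' : ∀ p ∈ PySem.List.enumerate urls 0,
      PySem.Set.contains (R1 urls).2 p.1 = c1 p.2 := by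
    intro p hp; rw [R1, stage, k1 p hp]; simp [c1]
  obtain ⟨v2, k2⟩ := stageB P2 c1 (R1 urls).2 urls k1'
  have k2' : ∀ p ∈ PySem.List.enumerate urls 0,
      PySem.Set.contains (R2 urls).2 p.1 = c2 p.2 := by
    intro p hp; rw [R2, stage, k2 p hp]; rfl
  obtain ⟨v3, k3⟩ := stageB P3 c2 (R2 urls).2 urls k2'
  have k3' : ∀ p ∈ PySem.List.enumerate urls 0,
      PySem.Set.contains (R3 urls).2 p.1 = c3 p.2 := by
    intro p hp; rw [R3, stage, k3 p hp]; rfl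
  obtain ⟨v4, k4⟩ := stageB P4 c3 (R3 urls).2 urls k3'
  have k4' : ∀ p ∈ PySem.List.enumerate urls 0,
      PySem.Set.contains (R4 urls).2 p.1 = c4 p.2 := by
    intro p hp; rw [R4, stage, k4 p hp]; rfl
  obtain ⟨v5, k5⟩ := stageB P5 c4 (R4 urls).2 urls k4'
  have k5' : ∀ p ∈ PySem.List.enumerate urls 0,
      PySem.Set.contains (R5 urls).2 p.1 = c5 p.2 := by
    intro p hp; rw [R5, stage, k5 p hp]; rfl
  obtain ⟨v6, k6⟩ := stageB P6 c5 (R5 urls).2 urls k5'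
  have V1 : (R1 urls).1 = urls.filter g1 := by
    rw [R1, stage, v1]; apply List.filter_congr; intro u _; simp [g1]
  have V2 : (R2 urls).1 = urls.filter g2 := by
    rw [R2, stage, v2]; apply List.filter_congr; intro u _; simp [g2]
  have V3 : (R3 urls).1 = urls.filter g3 := by
    rw [R3, stage, v3]; apply List.filter_congr; intro u _; simp [g3]
  have V4 : (R4 urls).1 = urls.filter g4 := by
    rw [R4, stage, v4]; apply List.filter_congr; intro u _; simp [g4]
  have V5 : (R5 urls).1 = urls.filter g5 := by
    rw [R5, stage, v5]; apply List.filter_congr; intro u _; simp [g5]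
  have V6 : (R6 urls).1 = urls.filter g6 := by
    rw [R6, stage, v6]; apply List.filter_congr; intro u _; simp [g6]
  rw [B_unfold, V1, V2, V3, V4, V5, V6]
  simp [PySem.Dict.insert, PySem.Dict.empty, PySem.Dict.contains, PySem.Dict.items]


-- ===== VERDICT (by name: the statement is the Claim_ definition above) =====
theorem classify_flows_spec : Claim_equal_classify_flows := by
  intro urls _
  show classify_flows urls = classify_flows_alt urls
  rw [A_char, B_char]
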